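-- pv_equiv track=rewrite | github.com/Lautarostuve/LexerPY | algoritmolexer.py | automataopsuma
-- ===== SOURCE A (Python) =====
-- ESTADO_FINAL="Estado final"
--
-- ESTADO_TRAMPA="Estado trampa"
--
-- ESTADO_NO_FINAL="Estado aceptado"
--
-- def automataopsuma(lexema):
--     estado = 0
--     estados_finales = [1]
--     for caracter in lexema:
--         if estado == 0 and caracter == '+':
--             estado = 1
--         elif estado == 0 and caracter =='-':
--             estado =1
--         else:
--             estado =-1
--             break
--
--     if estado == -1:
--         return ESTADO_TRAMPA
--     elif estado in estados_finales:
--         return ESTADO_FINAL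
--     else:
--         return ESTADO_NO_FINAL
-- ===== SOURCE B (Python) =====
-- ESTADO_FINAL="Estado final"
-- ESTADO_TRAMPA="Estado trampa"
-- ESTADO_NO_FINAL="Estado aceptado"
--
-- def automataopsuma(lexema):
--     items = list(lexema)
--     if not items:
--         return ESTADO_NO_FINAL
--     elif len(items) == 1 and items[0] in ('+', '-'):
--         return ESTADO_FINAL
--     else:
--         return ESTADO_TRAMPA
-- ===== Notes on version B (the rewrite author's own statement) =====
-- stated objective: simpler
-- what changed: Replaced the per-character state-machine loop with a closed-form length/membership check on the materialized input.
import Mathlib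
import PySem

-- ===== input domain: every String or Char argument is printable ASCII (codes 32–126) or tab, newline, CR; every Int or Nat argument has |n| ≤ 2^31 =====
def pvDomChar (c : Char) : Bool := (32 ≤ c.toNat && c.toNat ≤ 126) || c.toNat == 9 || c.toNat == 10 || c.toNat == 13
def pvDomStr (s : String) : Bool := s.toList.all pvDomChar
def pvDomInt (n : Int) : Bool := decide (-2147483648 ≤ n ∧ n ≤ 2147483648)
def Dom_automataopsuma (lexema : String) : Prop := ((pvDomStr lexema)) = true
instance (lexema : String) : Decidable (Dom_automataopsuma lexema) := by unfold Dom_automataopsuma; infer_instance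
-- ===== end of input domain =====

-- B replaces A's per-character state machine with a closed-form length/membership check (simpler).

-- ===== PORT A =====
-- the for-loop with break: threads 'estado'; break encoded as returning -1 immediately
def automataopsumaLoop : Int → List Char → Int
  | estado, [] => estado
  | estado, c :: cs =>
    if estado = 0 ∧ c = '+' then automataopsumaLoop 1 cs
    else if estado = 0 ∧ c = '-' then automataopsumaLoop 1 cs
    else -1

def automataopsuma (lexema : String) : String :=
  let estadosFinales : List Int := [1]
  let estado := automataopsumaLoop 0 lexema.toList
  if estado = -1 then "Estado trampa"
  else if estado ∈ estadosFinales then "Estado final"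
  else "Estado aceptado"

-- ===== PORT B =====
def automataopsuma_alt (lexema : String) : String :=
  let items := lexema.toList
  if items.isEmpty then "Estado aceptado"
  else if items.length = 1 ∧ items[0]! ∈ ['+', '-'] then "Estado final"
  else "Estado trampa"

-- ===== PRECONDITION & SPEC =====
def Spec_automataopsuma (lexema : String) (out : String) : Prop := out = automataopsuma_alt lexema
instance (lexema : String) (out : String) : Decidable (Spec_automataopsuma lexema out) := by unfold Spec_automataopsuma; infer_instance

-- ===== CLAIM (what is proved, stated in full; the proofs are below) =====
def Claim_equal_automataopsuma : Prop := ∀ (lexema : String), Dom_automataopsuma lexema → Spec_automataopsuma lexema (automataopsuma lexema)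

-- ===== LEMMAS AND PROOFS =====

-- from a non-zero state, any further character traps the automaton
theorem automataopsumaLoop_ne_zero (cs : List Char) (e : Int) (he : e ≠ 0) (hne : cs ≠ []) :
    automataopsumaLoop e cs = -1 := by
  cases cs with
  | nil => exact absurd rfl hne
  | cons c cs =>
    simp [automataopsumaLoop, he]

-- ===== VERDICT (by name: the statement is the Claim_ definition above) =====
theorem automataopsuma_spec : Claim_equal_automataopsuma := by
  intro lexema _
  unfold Spec_automataopsuma automataopsuma automataopsuma_alt
  cases h : lexema.toList with
  | nil => simp [automataopsumaLoop]
  | cons c cs =>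
    cases cs with
    | nil =>
      by_cases hp : c = '+'
      · simp [automataopsumaLoop, hp]
      · by_cases hm : c = '-'
        · simp [automataopsumaLoop, hp, hm]
        · simp [automataopsumaLoop, hp, hm]
    | cons c2 cs2 =>
      by_cases hp : c = '+'
      · simp [automataopsumaLoop, hp, automataopsumaLoop_ne_zero (c2 :: cs2) 1 (by norm_num) (by simp)]
      · by_cases hm : c = '-'
        · simp [automataopsumaLoop, hp, hm, automataopsumaLoop_ne_zero (c2 :: cs2) 1 (by norm_num) (by simp)]
        · simp [automataopsumaLoop, hp, hm]
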